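-- pv_equiv track=rewrite | github.com/filorazi/Dim_red_SWAP | vae_06_cost.py | sites_to_site_op
-- ===== SOURCE A (Python) =====
-- def sites_to_site_op(sites):
--     # Having a list of sites e.g. [[1,3,8], [2,4,7]], we add all possible
--     # combinations of 'x', 'y', and 'z' operators to it.
--     # E.g. [[1,3,8], ...] --> [[[1, 'y'], [3, 'z'], [8, 'z']], ...]
--     def sites_to_site_op_iterative_fn(sites, ind):
--         if len(sites) == 0 or ind < 0:
--             return []
--         if ind == len(sites[0]):
--             return sites
--         return sites_to_site_op_iterative_fn([s[:ind] + [(s[ind], op)] + s[(ind+1):]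
--                                              for s in sites for op in ['x', 'y', 'z']],
--                                              ind+1)
--     return sites_to_site_op_iterative_fn(sites, 0)
-- ===== SOURCE B (Python) =====
-- def sites_to_site_op(sites):
--     # Enumerate all operator combinations for the K tracked positions once,
--     # then pair each site with each combination in a single comprehension
--     # (per-site blocks contiguous, first position slowest: A's order).
--     if not sites:
--         return []
--     K = len(sites[0])
--     combos = [[]]
--     for _ in range(K):
--         combos = [c + [op] for c in combos for op in ['x', 'y', 'z']]
--     return [[(s[i], ops[i]) for i in range(K)] + s[K:]
--             for s in sites for ops in combos]
-- ===== Notes on version B (the rewrite author's own statement) =====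
-- stated objective: idiomatic
-- what changed: B precomputes the list of all 3^K operator combinations once and builds each output row directly from a site and one combination in a single comprehension, instead of A's recursion that rebuilds every site list position by position with slicing.
import Mathlib
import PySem

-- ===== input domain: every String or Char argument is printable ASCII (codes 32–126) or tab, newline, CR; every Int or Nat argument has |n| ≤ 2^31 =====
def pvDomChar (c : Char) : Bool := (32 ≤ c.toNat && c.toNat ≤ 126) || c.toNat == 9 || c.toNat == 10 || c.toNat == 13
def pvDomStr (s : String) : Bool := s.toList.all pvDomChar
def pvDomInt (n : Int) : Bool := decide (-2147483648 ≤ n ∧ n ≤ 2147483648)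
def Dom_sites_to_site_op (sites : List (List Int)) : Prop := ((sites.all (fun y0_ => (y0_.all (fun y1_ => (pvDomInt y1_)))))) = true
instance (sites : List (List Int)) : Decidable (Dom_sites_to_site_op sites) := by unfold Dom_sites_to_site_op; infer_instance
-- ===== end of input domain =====

-- B enumerates all operator combinations once and zips them with each site (idiomatic, one pass)
-- instead of A's recursive per-position list rebuilding.


-- ===== PORT A =====
-- In Python the intermediate lists mix raw ints and (int, op) pairs; PElem models that mix.
abbrev PElem := Int ⊕ (Int × String)

-- one round: [s[:ind] + [(s[ind], op)] + s[(ind+1):] for s in sites for op in ['x','y','z']]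
def aRound (sites : List (List PElem)) (ind : Int) : List (List PElem) :=
  sites.flatMap (fun s =>
    (["x", "y", "z"] : List String).map (fun op =>
      PySem.List.slice s none (some ind) ++
      (match PySem.List.pyGet? s ind with
        | some (Sum.inl n) => [Sum.inr (n, op)]
        | some (Sum.inr p) => [Sum.inr p]  -- unreachable from the top-level call: s[ind] is still a raw int at round ind
        | none => [])                       -- IndexError in Python; such inputs are outside Pre_
      ++ PySem.List.slice s (some (ind + 1)) none))

-- sites_to_site_op_iterative_fn; fuel only makes the recursion structural and never runs out inside Pre_
def aFn (sites : List (List PElem)) (ind : Int) (fuel : Nat) : List (List PElem) :=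
  if sites.length = 0 ∨ ind < 0 then []
  else if ind = ((sites.headD []).length : Int) then sites
  else match fuel with
    | 0 => []
    | fuel' + 1 => aFn (aRound sites ind) (ind + 1) fuel'

def sites_to_site_op (sites : List (List Int)) : List (List (Int × String)) :=
  (aFn (sites.map (fun s => s.map Sum.inl)) 0 (sites.headD []).length).map
    (fun s => s.map (fun e => match e with
      | Sum.inl n => (n, "")   -- a raw int surviving to the end (site longer than sites[0]): outside Pre_
      | Sum.inr p => p))

-- ===== PORT B =====
-- combos = [c + [op] for c in combos for op in ['x','y','z']]
def bStep (cs : List (List String)) : List (List String) :=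
  cs.flatMap (fun c => (["x", "y", "z"] : List String).map (fun op => c ++ [op]))

-- combos = [[]]; for _ in range(K): combos = bStep combos
def bCombos (K : Nat) : List (List String) :=
  (List.range K).foldl (fun cs _ => bStep cs) [[]]

-- one row: [(s[i], ops[i]) for i in range(K)] + s[K:].  s[K:] is [] on every input Pre_
-- admits; its raw trailing ints are not values of the declared pair type, so they are
-- encoded as (n, "") here (only outside Pre_).
def bRow (s : List Int) (ops : List String) (K : Nat) : List (Int × String) :=
  (List.range K).map (fun (i : Nat) => (PySem.List.pyGetD s (i : Int) 0, PySem.List.pyGetD ops (i : Int) "")) ++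
    (PySem.List.slice s (some (K : Int)) none).map (fun n => (n, ""))

def sites_to_site_op_alt (sites : List (List Int)) : List (List (Int × String)) :=
  match sites with
  | [] => []
  | s0 :: _ =>
    sites.flatMap (fun s => (bCombos s0.length).map (fun ops => bRow s ops s0.length))

-- ===== PRECONDITION & SPEC =====
-- Pre_ excludes ragged inputs: a site shorter than sites[0] makes A (and B) raise IndexError, and a
-- longer one makes A (and B) return lists keeping raw trailing ints, not values of the declared pair type.
def Pre_sites_to_site_op (sites : List (List Int)) : Prop :=
  ∀ s ∈ sites, s.length = (sites.headD []).length

instance (sites : List (List Int)) : Decidable (Pre_sites_to_site_op sites) := by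
  unfold Pre_sites_to_site_op; infer_instance

def pvWitness_sites_to_site_op : List (List Int) := [[1, 2], [3, 4]]

def Spec_sites_to_site_op (sites : List (List Int)) (out : List (List (Int × String))) : Prop :=
  out = sites_to_site_op_alt sites

instance (sites : List (List Int)) (out : List (List (Int × String))) : Decidable (Spec_sites_to_site_op sites out) := by
  unfold Spec_sites_to_site_op; infer_instance

-- ===== CLAIM (what is proved, stated in full; the proofs are below) =====
def Claim_equal_sites_to_site_op : Prop := ∀ (sites : List (List Int)), Dom_sites_to_site_op sites → Pre_sites_to_site_op sites → Spec_sites_to_site_op sites (sites_to_site_op sites)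


-- ===== LEMMAS AND PROOFS =====

-- a site s midway through A's recursion: the first `ops.length` positions carry their operators,
-- the rest are still raw ints
def mixS (s : List Int) (ops : List String) : List PElem :=
  ((s.take ops.length).zip ops).map Sum.inr ++ (s.drop ops.length).map Sum.inl

-- A's state after j rounds
def stateJ (sites : List (List Int)) (j : Nat) : List (List PElem) :=
  sites.flatMap (fun s => (bCombos j).map (fun ops => mixS s ops))

theorem flatMap_congr_mem {α β : Type} {l : List α} {f g : α → List β}
    (h : ∀ a ∈ l, f a = g a) : l.flatMap f = l.flatMap g := by
  induction l with
  | nil => rfl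
  | cons x xs ih =>
    simp only [List.flatMap_cons]
    rw [h x (List.mem_cons_self), ih (fun a ha => h a (List.mem_cons_of_mem _ ha))]

theorem bCombos_succ (K : Nat) : bCombos (K + 1) = bStep (bCombos K) := by
  simp [bCombos, List.range_succ]

theorem bCombos_length (K : Nat) : ∀ ops ∈ bCombos K, ops.length = K := by
  induction K with
  | zero => simp [bCombos]
  | succ K ih =>
    intro ops hops
    rw [bCombos_succ] at hops
    simp only [bStep, List.mem_flatMap, List.mem_map] at hops
    obtain ⟨c, hc, op, _, rfl⟩ := hops
    simp [ih c hc]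

theorem bCombos_ex (K : Nat) : ∃ ops, ops ∈ bCombos K := by
  induction K with
  | zero => exact ⟨[], by simp [bCombos]⟩
  | succ K ih =>
    obtain ⟨ops, hops⟩ := ih
    refine ⟨ops ++ ["x"], ?_⟩
    rw [bCombos_succ]
    unfold bStep
    exact List.mem_flatMap.mpr ⟨ops, hops, by simp⟩

theorem bRow_eq_zip {s : List Int} {ops : List String} {K : Nat}
    (hs : s.length = K) (ho : ops.length = K) : bRow s ops K = s.zip ops := by
  unfold bRow
  rw [PySem.List.slice_from_natCast]
  have hdrop : s.drop K = [] := by rw [← hs, List.drop_length]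
  rw [hdrop]
  simp only [List.map_nil, List.append_nil]
  apply List.ext_getElem
  · simp [List.length_zip, hs, ho]
  · intro i h1 h2
    simp only [List.getElem_map, List.getElem_range, List.getElem_zip]
    have hiK : i < K := by simpa using h1
    rw [PySem.List.pyGetD_natCast, PySem.List.pyGetD_natCast]
    rw [List.getD_eq_getElem s 0 (by omega), List.getD_eq_getElem ops "" (by omega)]

theorem mixS_length {s : List Int} {ops : List String} (h : ops.length ≤ s.length) :
    (mixS s ops).length = s.length := by
  simp [mixS]
  omega

theorem mixS_decomp {s : List Int} {ops : List String} (h : ops.length < s.length) :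
    mixS s ops = ((s.take ops.length).zip ops).map Sum.inr ++
      Sum.inl s[ops.length] :: (s.drop (ops.length + 1)).map Sum.inl := by
  unfold mixS
  rw [List.drop_eq_getElem_cons h, List.map_cons]

-- one op-attachment in A = extending the combination by one op
theorem aRound_elem {s : List Int} {ops : List String} (op : String)
    (h : ops.length < s.length) :
    PySem.List.slice (mixS s ops) none (some (ops.length : Int)) ++
      (match PySem.List.pyGet? (mixS s ops) (ops.length : Int) with
        | some (Sum.inl n) => [Sum.inr (n, op)]
        | some (Sum.inr p) => [Sum.inr p]
        | none => []) ++
      PySem.List.slice (mixS s ops) (some ((ops.length : Int) + 1)) none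
    = mixS s (ops ++ [op]) := by
  set j := ops.length with hj
  set front := ((s.take j).zip ops).map (Sum.inr (α := Int)) with hfront_def
  set tail := (s.drop (j + 1)).map (Sum.inl (β := Int × String)) with htail_def
  have hfront : front.length = j := by simp [hfront_def]; omega
  have hdecomp : mixS s ops = front ++ Sum.inl s[j] :: tail := mixS_decomp h
  rw [hdecomp, PySem.List.slice_to_natCast]
  rw [List.take_append_of_le_length (le_of_eq hfront.symm), List.take_of_length_le (le_of_eq hfront)]
  have hget := PySem.List.pyGet?_append_length (pre := front) (y := (Sum.inl s[j] : PElem)) (ys := tail)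
  rw [hfront] at hget
  rw [hget]
  have h1 : ((j : Int) + 1) = ((j + 1 : Nat) : Int) := by push_cast; ring
  rw [h1, PySem.List.slice_from_natCast]
  have hsplit : front ++ Sum.inl s[j] :: tail = (front ++ [Sum.inl s[j]]) ++ tail := by simp
  have hdropnil : (front ++ [Sum.inl s[j]]).drop (j + 1) = [] := by
    apply List.drop_eq_nil_of_le
    simp [hfront]
  rw [hsplit, List.drop_append_of_le_length (by simp [hfront]), hdropnil, List.nil_append]
  unfold mixS
  have hlen2 : (ops ++ [op]).length = j + 1 := by simp [hj]
  rw [hlen2]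
  have htake : s.take (j + 1) = s.take j ++ [s[j]] := by
    rw [List.take_add_one, List.getElem?_eq_getElem h]
    rfl
  rw [htake, List.zip_append (by simp [hj]; omega)]
  simp [hfront_def, htail_def]

-- A's round maps state j to state (j+1)
theorem aRound_state {sites : List (List Int)} {K j : Nat}
    (hs : ∀ s ∈ sites, s.length = K) (hj : j < K) :
    aRound (stateJ sites j) (j : Int) = stateJ sites (j + 1) := by
  unfold aRound stateJ
  rw [List.flatMap_assoc]
  rw [bCombos_succ]
  apply flatMap_congr_mem
  intro s hsmem
  rw [List.flatMap_map]
  unfold bStep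
  rw [List.map_flatMap]
  apply flatMap_congr_mem
  intro ops hops
  have hoj : ops.length = j := bCombos_length j ops hops
  have hlen : ops.length < s.length := by rw [hoj, hs s hsmem]; exact hj
  simp only [List.map_map, Function.comp_def]
  rw [← hoj]
  apply List.map_congr_left
  intro op _
  exact aRound_elem op hlen

theorem stateJ_head {s0 : List Int} {rest : List (List Int)} {K j : Nat}
    (h0 : s0.length = K) (hj : j ≤ K) :
    ((stateJ (s0 :: rest) j).headD []).length = K ∧ (stateJ (s0 :: rest) j).length ≠ 0 := by
  obtain ⟨ops, hops⟩ := bCombos_ex j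
  have hopslen : ops.length = j := bCombos_length j ops hops
  unfold stateJ
  rw [List.flatMap_cons]
  rcases hcombos : bCombos j with _ | ⟨o1, os⟩
  · rw [hcombos] at hops; simp at hops
  · constructor
    · simp only [List.map_cons, List.cons_append, List.headD_cons]
      rw [mixS_length (by rw [bCombos_length j o1 (by rw [hcombos]; exact List.mem_cons_self), h0]; exact hj)]
      exact h0
    · simp

-- the loop: running A's recursion from state j with fuel K - j lands on state K
theorem aFn_loop {sites : List (List Int)} {s0 : List Int} {rest : List (List Int)} {K : Nat}
    (hsites : sites = s0 :: rest) (hs : ∀ s ∈ sites, s.length = K) :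
    ∀ (fuel j : Nat), j + fuel = K →
      aFn (stateJ sites j) (j : Int) fuel = stateJ sites K := by
  have h0 : s0.length = K := hs s0 (hsites ▸ List.mem_cons_self)
  intro fuel
  induction fuel with
  | zero =>
    intro j hjK
    have hj : j = K := by omega
    subst hsites
    obtain ⟨hhead, hne⟩ := stateJ_head h0 (le_of_eq hj)
    unfold aFn
    rw [if_neg (by push_neg; exact ⟨hne, by omega⟩), hhead,
      if_pos (by exact_mod_cast congrArg (Nat.cast (R := Int)) hj)]
    rw [hj]
  | succ fuel ih =>
    intro j hjK
    have hjlt : j < K := by omega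
    subst hsites
    obtain ⟨hhead, hne⟩ := stateJ_head h0 (le_of_lt hjlt)
    unfold aFn
    rw [if_neg (by push_neg; exact ⟨hne, by omega⟩), hhead,
      if_neg (by intro hc; exact absurd (by exact_mod_cast hc : j = K) (by omega))]
    rw [aRound_state hs hjlt]
    have hcast : ((j : Int) + 1) = ((j + 1 : Nat) : Int) := by push_cast; ring
    rw [hcast]
    exact ih (j + 1) (by omega)

theorem stateJ_zero (sites : List (List Int)) :
    sites.map (fun s => s.map Sum.inl) = stateJ sites 0 := by
  unfold stateJ
  simp only [bCombos, List.range_zero, List.foldl_nil, List.map_cons, List.map_nil]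
  induction sites with
  | nil => rfl
  | cons s ss ih => simp [mixS] at ih ⊢; exact ih

-- stripping the (by then absent) raw-int constructor from state K yields B's zips
theorem stateK_final {sites : List (List Int)} {K : Nat} (hs : ∀ s ∈ sites, s.length = K) :
    (stateJ sites K).map (fun s => s.map (fun e => match e with
      | Sum.inl n => (n, "")
      | Sum.inr p => p))
    = sites.flatMap (fun s => (bCombos K).map (fun ops => s.zip ops)) := by
  unfold stateJ
  rw [List.map_flatMap]
  apply flatMap_congr_mem
  intro s hsmem
  simp only [List.map_map, Function.comp_def]
  apply List.map_congr_left
  intro ops hops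
  have hlen : ops.length = s.length := by rw [bCombos_length K ops hops, hs s hsmem]
  unfold mixS
  rw [hlen, List.take_length, List.drop_length]
  simp
  exact List.map_id'' (fun p => rfl) _

-- ===== VERDICT (by name: the statement is the Claim_ definition above) =====
theorem sites_to_site_op_spec : Claim_equal_sites_to_site_op := by
  intro sites _hdom hpre
  unfold Spec_sites_to_site_op
  match hsites : sites with
  | [] => rfl
  | s0 :: rest =>
    have hs : ∀ s ∈ s0 :: rest, s.length = s0.length := by
      intro s hmem
      have := hpre s hmem
      simpa using this
    unfold sites_to_site_op
    simp only [List.headD_cons]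
    rw [stateJ_zero]
    have hloop := aFn_loop (K := s0.length) rfl hs s0.length 0 (by omega)
    have hloop' : aFn (stateJ (s0 :: rest) 0) 0 s0.length = stateJ (s0 :: rest) s0.length := by
      exact_mod_cast hloop
    rw [hloop', stateK_final hs]
    unfold sites_to_site_op_alt
    apply flatMap_congr_mem
    intro s hsmem
    apply List.map_congr_left
    intro ops hops
    exact (bRow_eq_zip (hs s hsmem) (bCombos_length s0.length ops hops)).symm
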